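-- pv_equiv track=rewrite | github.com/eliottcassidy2000/math | 04-computation/consec_palindrome_test.py | compute_consec
-- ===== SOURCE A (Python) =====
-- from itertools import permutations
--
-- def compute_consec(T, n, a, b):
--     """Compute consec(a,b,j) for T' = T + {a->b}."""
--     Tp = dict(T)
--     Tp[(a,b)] = 1
--
--     consec = [0] * (n - 1)
--     for perm in permutations(range(n)):
--         prod = 1
--         for k in range(n-1):
--             if Tp.get((perm[k], perm[k+1]), 0) == 0:
--                 prod = 0; break
--         if prod > 0:
--             for j in range(n-1):
--                 if perm[j] == a and perm[j+1] == b: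
--                     consec[j] += 1
--     return consec
-- ===== SOURCE B (Python) =====
-- def compute_consec(T, n, a, b):
--     """Compute consec(a,b,j) for T' = T + {a->b}, by pruned backtracking instead of
--     filtering all n! permutations: extend only along existing edges, remembering the
--     position where a->b was used, and record one count per completed Hamiltonian path."""
--     Tp = dict(T)
--     Tp[(a, b)] = 1
--
--     adj = {}
--     for (u, v), w in Tp.items():
--         if w != 0:
--             adj[u] = adj.get(u, []) + [v]
--
--     consec = [0] * (n - 1)
--
--     def dfs(last, remaining, pos, j):
--         if not remaining:
--             if j is not None:
--                 consec[j] += 1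
--             return
--         for v in adj.get(last, []):
--             if v in remaining:
--                 dfs(v, remaining - {v}, pos + 1, pos if (last == a and v == b) else j)
--
--     nodes = frozenset(range(n))
--     for u in range(n):
--         dfs(u, nodes - {u}, 0, None)
--     return consec
-- ===== Notes on version B (the rewrite author's own statement) =====
-- stated objective: faster
-- what changed: A materialises all n! permutations and tests each one against the edge table; B counts by backtracking DFS that only extends a partial path along existing adjacency-list edges (pruning every dead prefix immediately) and records the position where the edge a->b was used.
import Mathlib
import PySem

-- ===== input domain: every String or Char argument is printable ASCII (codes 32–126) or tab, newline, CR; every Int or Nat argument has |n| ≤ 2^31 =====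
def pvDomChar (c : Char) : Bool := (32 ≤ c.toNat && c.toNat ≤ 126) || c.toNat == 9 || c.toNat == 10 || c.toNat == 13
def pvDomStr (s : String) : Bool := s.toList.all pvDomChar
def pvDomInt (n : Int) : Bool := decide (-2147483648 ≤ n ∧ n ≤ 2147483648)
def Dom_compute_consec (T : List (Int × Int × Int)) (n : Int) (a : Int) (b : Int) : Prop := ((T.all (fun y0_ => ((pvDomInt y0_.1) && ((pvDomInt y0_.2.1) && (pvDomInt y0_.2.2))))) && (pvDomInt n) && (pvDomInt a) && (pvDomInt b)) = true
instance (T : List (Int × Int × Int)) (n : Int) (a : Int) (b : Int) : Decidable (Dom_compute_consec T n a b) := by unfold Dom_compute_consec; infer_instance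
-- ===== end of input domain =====

-- B is a pruned backtracking search instead of A's filter over all n! permutations;
-- the equivalence below is about the return value (neither port mutates its arguments).

-- ===== PORT A =====
-- shared by both ports: both Python sources begin with `Tp = dict(T); Tp[(a,b)] = 1`
def pvTp (T : List (Int × Int × Int)) (a b : Int) : PySem.Dict (Int × Int) Int :=
  (T.foldl (fun d t => d.insert (t.1, t.2.1) t.2.2) PySem.Dict.empty).insert (a, b) 1

-- the inner `for k in range(n-1): if Tp.get(...) == 0: prod = 0; break` loop
def pvProd (Tp : PySem.Dict (Int × Int) Int) (perm : List Int) : List Int → Int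
  | [] => 1
  | k :: ks =>
      if Tp.getD (PySem.List.pyGetD perm k 0, PySem.List.pyGetD perm (k + 1) 0) 0 == 0 then 0
      else pvProd Tp perm ks

def compute_consec (T : List (Int × Int × Int)) (n : Int) (a : Int) (b : Int) : List Int :=
  let Tp := pvTp T a b
  let consec0 : List Int := List.replicate (n - 1).toNat 0
  let nodes := PySem.List.pyRange 0 n 1
  (PySem.List.permutations nodes nodes.length).foldl
    (fun consec perm =>
      let prod := pvProd Tp perm (PySem.List.pyRange 0 (n - 1) 1)
      if prod > 0 then
        (PySem.List.pyRange 0 (n - 1) 1).foldl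
          (fun c j =>
            if PySem.List.pyGetD perm j 0 == a && PySem.List.pyGetD perm (j + 1) 0 == b then
              PySem.List.pySetD c j (PySem.List.pyGetD c j 0 + 1)
            else c) consec
      else consec) consec0

-- ===== PORT B =====
-- adjacency lists: `for (u,v),w in Tp.items(): if w != 0: adj[u] = adj.get(u,[]) + [v]`
def pvAdj (Tp : PySem.Dict (Int × Int) Int) : PySem.Dict Int (List Int) :=
  Tp.items.foldl
    (fun d q => if q.2 != 0 then d.modify q.1.1 [] (· ++ [q.1.2]) else d) PySem.Dict.empty

-- the recursive `dfs(last, remaining, pos, j)`; fuel only makes the recursion structural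
def pvDfs (adj : PySem.Dict Int (List Int)) (a b : Int) :
    Nat → Int → List Int → Int → Option Int → List Int → List Int
  | fuel, last, remaining, pos, j, consec =>
    if remaining.isEmpty then
      match j with
      | some j0 => PySem.List.pySetD consec j0 (PySem.List.pyGetD consec j0 0 + 1)
      | none => consec
    else
      match fuel with
      | 0 => consec
      | fuel + 1 =>
        (adj.getD last []).foldl
          (fun c v =>
            if remaining.contains v then
              pvDfs adj a b fuel v (remaining.erase v) (pos + 1)
                (if last == a && v == b then some pos else j) c
            else c) consec

def compute_consec_alt (T : List (Int × Int × Int)) (n : Int) (a : Int) (b : Int) : List Int :=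
  let Tp := pvTp T a b
  let adj := pvAdj Tp
  let consec0 : List Int := List.replicate (n - 1).toNat 0
  let nodes := PySem.List.pyRange 0 n 1
  nodes.foldl
    (fun c u => pvDfs adj a b (nodes.erase u).length u (nodes.erase u) 0 none c) consec0

-- ===== PRECONDITION & SPEC =====
def Spec_compute_consec (T : List (Int × Int × Int)) (n : Int) (a : Int) (b : Int) (out : List Int) : Prop := out = compute_consec_alt T n a b
instance (T : List (Int × Int × Int)) (n : Int) (a : Int) (b : Int) (out : List Int) : Decidable (Spec_compute_consec T n a b out) := by unfold Spec_compute_consec; infer_instance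

-- ===== CLAIM (what is proved, stated in full; the proofs are below) =====
def Claim_equal_compute_consec : Prop := ∀ (T : List (Int × Int × Int)) (n : Int) (a : Int) (b : Int), Dom_compute_consec T n a b → Spec_compute_consec T n a b (compute_consec T n a b)

-- ===== LEMMAS AND PROOFS =====

-- `pvChain adj last q`: every consecutive step of `last :: q` follows an adjacency edge
def pvChain (adj : PySem.Dict Int (List Int)) : Int → List Int → Bool
  | _, [] => true
  | last, v :: q => (adj.getD last []).contains v && pvChain adj v q

-- index of the first occurrence of a followed immediately by b
def pvFirstAB (a b : Int) : List Int → Option Nat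
  | x :: y :: t => if x = a ∧ y = b then some 0 else (pvFirstAB a b (y :: t)).map (· + 1)
  | _ => none

-- contribution of one completion q of a partial path (… last) to consec[i]
def pvContrib (adj : PySem.Dict Int (List Int)) (a b : Int) (pos : Int) (j : Option Int)
    (last : Int) (q : List Int) (i : Nat) : Int :=
  if pvChain adj last q then
    match pvFirstAB a b (last :: q) with
    | some k => if pos + (k : Int) = (i : Int) then 1 else 0
    | none =>
      match j with
      | some j0 => if j0 = (i : Int) then 1 else 0
      | none => 0
  else 0

def pvSum (adj : PySem.Dict Int (List Int)) (a b last : Int) (rem : List Int)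
    (pos : Int) (j : Option Int) (i : Nat) : Int :=
  ((PySem.List.permutations rem rem.length).map (fun q => pvContrib adj a b pos j last q i)).sum

theorem pvFoldStep {β : Type} (ns : List β) (step : List Int → β → List Int) (g : β → Int) (i : Nat)
    (hstep : ∀ c v, v ∈ ns → (step c v).length = c.length ∧
      (i < c.length → (step c v).getD i 0 = c.getD i 0 + g v)) :
    ∀ c : List Int, (ns.foldl step c).length = c.length ∧
      (i < c.length → (ns.foldl step c).getD i 0 = c.getD i 0 + (ns.map g).sum) := by
  induction ns with
  | nil => intro c; simp
  | cons v t ih =>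
    intro c
    have hv := hstep c v (by simp)
    have iht := ih (fun c w hw => hstep c w (by simp [hw])) (step c v)
    constructor
    · rw [List.foldl_cons, iht.1, hv.1]
    · intro hi
      have h2 : i < (step c v).length := by rw [hv.1]; exact hi
      rw [List.foldl_cons, iht.2 h2, hv.2 hi]
      simp [add_assoc]

theorem pvSetD_getD (c : List Int) (jj v : Int) (hj : 0 ≤ jj) (i : Nat) (hi : i < c.length) :
    (PySem.List.pySetD c jj v).getD i 0 = if (i : Int) = jj then v else c.getD i 0 := by
  rw [PySem.List.pySetD_of_nonneg c v hj]
  rcases Nat.lt_or_ge jj.toNat c.length with h | h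
  · rw [List.getD_eq_getElem _ _ (by simpa using hi), List.getD_eq_getElem _ _ hi,
      List.getElem_set]
    split
    · next he => rw [if_pos (by omega)]
    · next he => rw [if_neg (by omega)]
  · rw [List.set_eq_of_length_le (by omega)]
    rw [if_neg (by omega)]

theorem pvTp_keys_nodup (T : List (Int × Int × Int)) (a b : Int) : (pvTp T a b).keys.Nodup := by
  unfold pvTp
  exact PySem.Dict.nodup_keys_insert _ _ _
    (PySem.Dict.nodup_keys_foldl_insert_key T (fun t => (t.1, t.2.1)) (fun d t => t.2.2)
      PySem.Dict.empty (by simp [PySem.Dict.keys_empty]))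

theorem pvAdj_getD (Tp : PySem.Dict (Int × Int) Int) (u : Int) :
    (pvAdj Tp).getD u []
      = (((Tp.items.filter (fun q => q.2 != 0)).map (fun q => q.1)).filter
          (fun p => p.1 == u)).map (fun p => p.2) := by
  unfold pvAdj
  simp only [PySem.List.foldl_if_eq_foldl_filter]
  rw [← List.foldl_map (f := fun q : (Int × Int) × Int => q.1)
    (g := fun (d : PySem.Dict Int (List Int)) (p : Int × Int) => d.modify p.1 [] (· ++ [p.2]))]
  rw [PySem.Dict.getD_foldl_modify_append]
  simp [PySem.Dict.getD_empty]

theorem pvEdge_iff (Tp : PySem.Dict (Int × Int) Int) (hnd : Tp.keys.Nodup) (u v : Int) :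
    v ∈ (pvAdj Tp).getD u [] ↔ Tp.getD (u, v) 0 ≠ 0 := by
  rw [pvAdj_getD]
  constructor
  · intro h
    simp only [List.mem_map, List.mem_filter] at h
    obtain ⟨p, ⟨⟨q, ⟨hqm, hw'⟩, hq1⟩, hu⟩, hv⟩ := h
    subst hq1
    have hw : q.2 ≠ 0 := by simpa using hw'
    have hkey : q.1 = (u, v) := by
      have h1 : q.1.1 = u := by simpa using hu
      have h2 : q.1.2 = v := hv
      cases hk : q.1; simp_all
    have : ((u, v), q.2) ∈ Tp.items := by rw [← hkey]; exact hqm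
    rw [PySem.Dict.getD_of_mem_items Tp this hnd]
    exact hw
  · intro h
    rcases hg : Tp.get? (u, v) with _ | w
    · rw [PySem.Dict.getD_eq_get?_getD, hg] at h; simp at h
    · have hm := PySem.Dict.mem_items_of_get?_eq_some Tp hg
      have hw : w ≠ 0 := by
        rw [PySem.Dict.getD_eq_get?_getD, hg] at h; simpa using h
      simp only [List.mem_map, List.mem_filter]
      refine ⟨(u, v), ⟨⟨((u, v), w), ⟨hm, by simpa using hw⟩, rfl⟩, by simp⟩, rfl⟩

theorem pvAdj_nodup (Tp : PySem.Dict (Int × Int) Int) (hnd : Tp.keys.Nodup) (u : Int) :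
    ((pvAdj Tp).getD u []).Nodup := by
  rw [pvAdj_getD]
  have hkeys : (Tp.items.map (fun q => q.1)).Nodup := by
    simpa [PySem.Dict.keys] using hnd
  have h1 : ((Tp.items.filter (fun q => q.2 != 0)).map (fun q => q.1)).Nodup := by
    have hs : ((Tp.items.filter (fun q => q.2 != 0)).map (fun q => q.1)).Sublist
        (Tp.items.map (fun q => q.1)) := List.Sublist.map _ List.filter_sublist
    exact hs.nodup hkeys
  have h2 := h1.filter (fun p => p.1 == u)
  refine h2.map_on ?_
  intro x hx y hy hxy
  have hxu : x.1 = u := by simpa using (List.mem_filter.1 hx).2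
  have hyu : y.1 = u := by simpa using (List.mem_filter.1 hy).2
  cases x; cases y; simp_all

theorem pvPerms_succ (xs : List Int) (hx : xs ≠ []) :
    PySem.List.permutations xs xs.length
      = (List.range xs.length).flatMap (fun idx =>
          (PySem.List.permutations (xs.eraseIdx idx) (xs.length - 1)).map
            (fun p => xs.getD idx 0 :: p)) := by
  obtain ⟨L, hL⟩ : ∃ L, xs.length = L + 1 :=
    ⟨xs.length - 1, by cases xs with | nil => simp at hx | cons x t => simp⟩
  rw [hL, PySem.List.permutations]
  rw [List.flatMap_def, List.flatMap_def]
  congr 1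
  rw [← hL]
  apply List.map_congr_left
  intro idx hidx
  have hlt : idx < xs.length := List.mem_range.1 hidx
  rw [List.getElem?_eq_getElem hlt]
  rw [List.getD_eq_getElem xs 0 hlt]
  simp [hL]

theorem pvMap_getD_range {β : Type} (l : List Int) (ψ : Int → β) :
    (List.range l.length).map (fun idx => ψ (l.getD idx 0)) = l.map ψ := by
  induction l with
  | nil => simp
  | cons x t ih =>
    rw [List.length_cons, List.range_succ_eq_map, List.map_cons, List.map_map, List.map_cons]
    refine congrArg₂ List.cons (by simp) ?_
    rw [← ih]
    apply List.map_congr_left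
    intro idx _
    simp

theorem pvSum_perms_cons (rem : List Int) (hnd : rem.Nodup) (hne : rem ≠ []) (F : List Int → Int) :
    ((PySem.List.permutations rem rem.length).map F).sum
      = (rem.map (fun v =>
          ((PySem.List.permutations (rem.erase v) (rem.erase v).length).map
            (fun q => F (v :: q))).sum)).sum := by
  rw [pvPerms_succ rem hne, List.map_flatMap, List.flatMap_def, List.sum_flatten, List.map_map]
  rw [← pvMap_getD_range rem (fun v =>
    ((PySem.List.permutations (rem.erase v) (rem.erase v).length).map
      (fun q => F (v :: q))).sum)]
  congr 1
  apply List.map_congr_left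
  intro idx hidx
  have hlt : idx < rem.length := List.mem_range.1 hidx
  have hgd : rem.getD idx 0 = rem[idx] := List.getD_eq_getElem rem 0 hlt
  have her : rem.erase (rem.getD idx 0) = rem.eraseIdx idx := by
    rw [hgd]; exact hnd.erase_getElem idx hlt
  have hlen : (rem.eraseIdx idx).length = rem.length - 1 := by
    rw [List.length_eraseIdx]; simp [hlt]
  simp only [Function.comp, her, hlen, List.map_map]
  rfl

theorem pvFirstAB_none (a b : Int) (p : List Int) (ha : a ∉ p) : pvFirstAB a b p = none := by
  induction p with
  | nil => rfl
  | cons x t ih =>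
    cases t with
    | nil => rfl
    | cons y s =>
      have hxa : x ≠ a := by intro h; exact ha (h ▸ List.mem_cons_self)
      rw [pvFirstAB, if_neg (by tauto), ih (by intro h; exact ha (List.mem_cons_of_mem _ h))]
      rfl

theorem pvContrib_nil (adj : PySem.Dict Int (List Int)) (a b pos : Int) (j : Option Int)
    (last : Int) (i : Nat) :
    pvContrib adj a b pos j last [] i
      = (match j with | some j0 => if j0 = (i : Int) then 1 else 0 | none => 0) := by
  rw [pvContrib.eq_def]
  simp only [pvChain, pvFirstAB, if_true]

theorem pvContrib_cons (adj : PySem.Dict Int (List Int)) (a b pos : Int) (j : Option Int)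
    (last v : Int) (q : List Int) (i : Nat)
    (hguard : last = a → v = b → a ∉ v :: q) :
    pvContrib adj a b pos j last (v :: q) i
      = if (adj.getD last []).contains v then
          pvContrib adj a b (pos + 1) (if last == a && v == b then some pos else j) v q i
        else 0 := by
  rw [pvContrib.eq_def, pvContrib.eq_def]
  rw [show pvChain adj last (v :: q) = ((adj.getD last []).contains v && pvChain adj v q) from rfl]
  by_cases hc : (adj.getD last []).contains v
  · rw [if_pos hc]
    simp only [hc, Bool.true_and]
    by_cases hch : pvChain adj v q
    · rw [if_pos hch, if_pos hch]
      by_cases hg : last = a ∧ v = b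
      · have hB : (last == a && v == b) = true := by simp [hg.1, hg.2]
        rw [hB]
        rw [show pvFirstAB a b (last :: v :: q) = some 0 from by rw [pvFirstAB, if_pos hg]]
        rw [pvFirstAB_none a b (v :: q) (hguard hg.1 hg.2)]
        simp
      · have hB : (last == a && v == b) = false := by
          rcases not_and_or.1 hg with h | h <;> simp [h]
        rw [hB]
        rw [show pvFirstAB a b (last :: v :: q)
            = (pvFirstAB a b (v :: q)).map (· + 1) from by rw [pvFirstAB, if_neg hg]]
        cases hf : pvFirstAB a b (v :: q) with
        | none => simp
        | some k =>
          simp only [Option.map_some]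
          have : pos + ((k + 1 : Nat) : Int) = pos + 1 + (k : Int) := by push_cast; ring
          rw [this]
    · rw [if_neg hch, if_neg hch]
  · have hc' : v ∉ adj.getD last [] := by simpa using hc
    rw [if_neg hc,
      if_neg (show ¬((adj.getD last []).contains v && pvChain adj v q) = true by simp [hc'])]

theorem pvSum_map_ite {P : Prop} [Decidable P] (l : List (List Int)) (f : List Int → Int) :
    (l.map (fun q => if P then f q else 0)).sum = if P then (l.map f).sum else 0 := by
  by_cases h : P <;> simp [h]

theorem pvSum_if_mem_comm (l₁ l₂ : List Int) (h₁ : l₁.Nodup) (h₂ : l₂.Nodup) (f : Int → Int) :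
    (l₁.map (fun v => if v ∈ l₂ then f v else 0)).sum
      = (l₂.map (fun v => if v ∈ l₁ then f v else 0)).sum := by
  have key : ∀ (l m : List Int), (l.map (fun v => if v ∈ m then f v else 0)).sum
      = ((l.filter (fun v => decide (v ∈ m))).map f).sum := by
    intro l m
    induction l with
    | nil => simp
    | cons x t ih =>
      by_cases hx : x ∈ m <;> simp [hx, ih]
  rw [key, key]
  have hperm : (l₁.filter (fun v => decide (v ∈ l₂))).Perm (l₂.filter (fun v => decide (v ∈ l₁))) := by
    rw [List.perm_ext_iff_of_nodup (h₁.filter _) (h₂.filter _)]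
    intro x
    simp only [List.mem_filter, decide_eq_true_eq]
    tauto
  exact (hperm.map f).sum_eq

theorem pvFirstAB_iff (a b : Int) (p : List Int) (hnd : p.Nodup) :
    ∀ (i : Nat), i + 1 < p.length →
      ((pvFirstAB a b p = some i) ↔ (p.getD i 0 = a ∧ p.getD (i + 1) 0 = b)) := by
  induction p with
  | nil => intro i hi; simp at hi
  | cons x t ih =>
    intro i hi
    cases t with
    | nil => simp at hi
    | cons y s =>
      rw [pvFirstAB]
      by_cases hg : x = a ∧ y = b
      · rw [if_pos hg]
        cases i with
        | zero => simpa using hg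
        | succ i' =>
          constructor
          · intro h; simp at h
          · rintro ⟨h1, h2⟩
            exfalso
            have hlt : i' + 1 < (y :: s).length := by simpa using hi
            have : (y :: s).getD i' 0 = a := by simpa using h1
            have hmem : a ∈ y :: s := by
              rw [← this, List.getD_eq_getElem _ _ (by omega : i' < (y :: s).length)]
              exact List.getElem_mem _
            rw [← hg.1] at hmem
            exact (List.nodup_cons.1 hnd).1 hmem
      · rw [if_neg hg]
        cases i with
        | zero =>
          constructor
          · intro h
            rcases Option.map_eq_some_iff.1 h with ⟨k, _, hk⟩
            omega
          · rintro ⟨h1, h2⟩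
            exact absurd ⟨by simpa using h1, by simpa using h2⟩ hg
        | succ i' =>
          have hlt : i' + 1 < (y :: s).length := by simpa using hi
          have := ih (List.nodup_cons.1 hnd).2 i' hlt
          constructor
          · intro h
            rcases Option.map_eq_some_iff.1 h with ⟨k, hk, hkk⟩
            have hki : k = i' := by omega
            rw [hki] at hk
            rcases (ih (List.nodup_cons.1 hnd).2 i' hlt).1 hk with ⟨h1, h2⟩
            exact ⟨by simpa using h1, by simpa using h2⟩
          · rintro ⟨h1, h2⟩
            have hk : pvFirstAB a b (y :: s) = some i' :=
              (ih (List.nodup_cons.1 hnd).2 i' hlt).2 ⟨by simpa using h1, by simpa using h2⟩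
            rw [hk]; rfl

theorem pvProd_eq (Tp : PySem.Dict (Int × Int) Int) (hnd : Tp.keys.Nodup) (p : List Int) :
    ∀ (q : List Int) (s : Nat) (x : Int), p.drop s = x :: q →
      pvProd Tp p (PySem.List.pyRange (s : Int) ((p.length : Int) - 1) 1)
        = (if pvChain (pvAdj Tp) x q then 1 else 0) := by
  intro q
  induction q with
  | nil =>
    intro s x hdrop
    have hlen : p.length = s + 1 := by
      have := List.length_drop (l := p) (i := s)
      rw [hdrop] at this
      simp at this
      omega
    rw [PySem.List.pyRange_one_eq_nil (by omega : ((p.length : Int) - 1) ≤ (s : Int))]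
    rw [pvProd]
    simp [pvChain]
  | cons y t ih =>
    intro s x hdrop
    have hslen : p.length - s = t.length + 2 := by
      have := List.length_drop (l := p) (i := s)
      rw [hdrop] at this
      simp at this
      omega
    have hs2 : s + 2 ≤ p.length := by
      rcases Nat.lt_or_ge p.length s with h | h
      · rw [List.drop_eq_nil_of_le (by omega)] at hdrop; simp at hdrop
      · omega
    have hget : ∀ (k : Nat), k < t.length + 2 → p.getD (s + k) 0 = (x :: y :: t).getD k 0 := by
      intro k hk
      have hsk : s + k < p.length := by omega
      have hk' : k < (p.drop s).length := by rw [List.length_drop]; omega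
      rw [List.getD_eq_getElem _ _ hsk, List.getD_eq_getElem _ _ (by simp; omega)]
      rw [← List.getElem_drop (h := hk')]
      congr 1
    have hx : p.getD s 0 = x := by simpa using hget 0 (by omega)
    have hy : p.getD (s + 1) 0 = y := by simpa using hget 1 (by omega)
    rw [PySem.List.pyRange_one_cons (by omega : (s : Int) < (p.length : Int) - 1)]
    rw [pvProd]
    rw [show PySem.List.pyGetD p (s : Int) 0 = x from by
      rw [PySem.List.pyGetD_natCast]; exact hx]
    rw [show PySem.List.pyGetD p ((s : Int) + 1) 0 = y from by
      rw [show ((s : Int) + 1) = ((s + 1 : Nat) : Int) from by push_cast; ring,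
        PySem.List.pyGetD_natCast]; exact hy]
    have hdrop' : p.drop (s + 1) = y :: t := by
      have hdd : p.drop (s + 1) = (p.drop s).drop 1 := by
        rw [List.drop_drop, Nat.add_comm]
      rw [hdd, hdrop]
      rfl
    rw [show pvChain (pvAdj Tp) x (y :: t)
        = (((pvAdj Tp).getD x []).contains y && pvChain (pvAdj Tp) y t) from rfl]
    by_cases h0 : Tp.getD (x, y) 0 = 0
    · rw [if_pos (by simpa using h0)]
      have hny : ¬ y ∈ (pvAdj Tp).getD x [] := by
        rw [pvEdge_iff Tp hnd]; simpa using h0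
      simp [hny]
    · rw [if_neg (by simpa using h0)]
      have hcy : ((pvAdj Tp).getD x []).contains y = true := by
        have : y ∈ (pvAdj Tp).getD x [] := (pvEdge_iff Tp hnd x y).2 h0
        simpa using this
      rw [show ((s : Int) + 1) = ((s + 1 : Nat) : Int) from by push_cast; ring]
      rw [ih (s + 1) y hdrop']
      rw [hcy]
      simp

theorem pvDfs_eq (adj : PySem.Dict Int (List Int)) (a b : Int) (fuel : Nat) (last : Int)
    (rem : List Int) (pos : Int) (j : Option Int) (c : List Int) :
    pvDfs adj a b fuel last rem pos j c
      = if rem.isEmpty then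
          (match j with
           | some j0 => PySem.List.pySetD c j0 (PySem.List.pyGetD c j0 0 + 1)
           | none => c)
        else
          (match fuel with
           | 0 => c
           | fuel + 1 =>
             (adj.getD last []).foldl
               (fun c v =>
                 if rem.contains v then
                   pvDfs adj a b fuel v (rem.erase v) (pos + 1)
                     (if last == a && v == b then some pos else j) c
                 else c) c) := by
  cases fuel <;> rfl

theorem pvSum_cons (adj : PySem.Dict Int (List Int)) (a b : Int) (rem : List Int)
    (last pos : Int) (j : Option Int) (i : Nat)
    (hnd : rem.Nodup) (hne : rem ≠ []) (hlast : last ∉ rem)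
    (hj : ∀ j0, j = some j0 → a ∉ last :: rem)
    (hadj : ∀ u, ((adj.getD u [] : List Int)).Nodup) :
    pvSum adj a b last rem pos j i
      = ((adj.getD last []).map (fun v =>
          if v ∈ rem then
            pvSum adj a b v (rem.erase v) (pos + 1)
              (if last == a && v == b then some pos else j) i
          else 0)).sum := by
  unfold pvSum
  rw [pvSum_perms_cons rem hnd hne]
  have step1 : ∀ v ∈ rem,
      ((PySem.List.permutations (rem.erase v) (rem.erase v).length).map
        (fun q => pvContrib adj a b pos j last (v :: q) i)).sum
      = if v ∈ adj.getD last [] then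
          ((PySem.List.permutations (rem.erase v) (rem.erase v).length).map
            (fun q => pvContrib adj a b (pos + 1)
              (if last == a && v == b then some pos else j) v q i)).sum
        else 0 := by
    intro v hv
    have hrw : ∀ q ∈ PySem.List.permutations (rem.erase v) (rem.erase v).length,
        pvContrib adj a b pos j last (v :: q) i
          = if (adj.getD last []).contains v then
              pvContrib adj a b (pos + 1)
                (if last == a && v == b then some pos else j) v q i
            else 0 := by
      intro q hq
      have hqp : q.Perm (rem.erase v) := PySem.List.perm_of_mem_permutations hq
      apply pvContrib_cons
      intro hla hvb
      subst hla
      intro hmem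
      rcases List.mem_cons.1 hmem with h | h
      · exact hlast (h ▸ hv)
      · exact hlast (List.mem_of_mem_erase (hqp.mem_iff.1 h))
    rw [List.map_congr_left hrw]
    rw [pvSum_map_ite (P := (adj.getD last []).contains v = true)]
    by_cases hc : v ∈ adj.getD last []
    · rw [if_pos (by simpa using hc), if_pos hc]
    · rw [if_neg (by simpa using hc), if_neg hc]
  rw [List.map_congr_left step1]
  exact pvSum_if_mem_comm rem (adj.getD last []) hnd (hadj last) _

theorem pvDfs_nil (adj : PySem.Dict Int (List Int)) (a b : Int) (i : Nat) (fuel : Nat)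
    (last pos : Int) (j : Option Int) (c : List Int)
    (h4 : ∀ j0, j = some j0 → 0 ≤ j0) :
    (pvDfs adj a b fuel last [] pos j c).length = c.length ∧
    (i < c.length →
      (pvDfs adj a b fuel last [] pos j c).getD i 0
        = c.getD i 0 + pvSum adj a b last [] pos j i) := by
  rw [pvDfs_eq]
  simp only [List.isEmpty_nil, if_true]
  cases j with
  | none =>
    have hsum : pvSum adj a b last [] pos none i = 0 := by
      unfold pvSum
      simp [PySem.List.permutations_zero, pvContrib_nil]
    exact ⟨rfl, fun _ => by rw [hsum]; simp⟩
  | some j0 =>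
    refine ⟨PySem.List.length_pySetD _ _ _, fun hi => ?_⟩
    have hsum : pvSum adj a b last [] pos (some j0) i = if j0 = (i : Int) then 1 else 0 := by
      unfold pvSum
      simp [PySem.List.permutations_zero, pvContrib_nil]
    rw [pvSetD_getD c j0 _ (h4 j0 rfl) i hi, hsum]
    by_cases hij : (i : Int) = j0
    · rw [if_pos hij, if_pos hij.symm, ← hij, PySem.List.pyGetD_natCast]
    · rw [if_neg hij, if_neg (by omega : ¬ j0 = (i : Int))]
      simp

theorem pvDfs_spec (adj : PySem.Dict Int (List Int)) (a b : Int) (i : Nat)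
    (hadj : ∀ u, ((adj.getD u [] : List Int)).Nodup) :
    ∀ (fuel : Nat) (rem : List Int) (last pos : Int) (j : Option Int) (c : List Int),
      rem.Nodup → rem.length ≤ fuel → last ∉ rem →
      (∀ j0, j = some j0 → 0 ≤ j0 ∧ a ∉ last :: rem) →
      0 ≤ pos →
      (pvDfs adj a b fuel last rem pos j c).length = c.length ∧
      (i < c.length →
        (pvDfs adj a b fuel last rem pos j c).getD i 0
          = c.getD i 0 + pvSum adj a b last rem pos j i) := by
  intro fuel
  induction fuel with
  | zero =>
    intro rem last pos j c h1 h2 h3 h4 h5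
    have hrem : rem = [] := List.length_eq_zero_iff.1 (by omega)
    subst hrem
    exact pvDfs_nil adj a b i 0 last pos j c (fun j0 hj0 => (h4 j0 hj0).1)
  | succ fuel ih =>
    intro rem last pos j c h1 h2 h3 h4 h5
    by_cases hrem : rem = []
    · subst hrem
      exact pvDfs_nil adj a b i (fuel + 1) last pos j c (fun j0 hj0 => (h4 j0 hj0).1)
    · rw [pvDfs_eq]
      rw [if_neg (by simpa [List.isEmpty_iff] using hrem)]
      have hfold := pvFoldStep (adj.getD last [])
        (fun c v =>
          if rem.contains v then
            pvDfs adj a b fuel v (rem.erase v) (pos + 1)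
              (if last == a && v == b then some pos else j) c
          else c)
        (fun v =>
          if v ∈ rem then
            pvSum adj a b v (rem.erase v) (pos + 1)
              (if last == a && v == b then some pos else j) i
          else 0) i ?hstep c
      case hstep =>
        intro c' v _
        by_cases hv : v ∈ rem
        · have hj' : ∀ j0, (if last == a && v == b then some pos else j) = some j0 →
              0 ≤ j0 ∧ a ∉ v :: rem.erase v := by
            intro j0 hj0
            have hav : a ∉ v :: rem.erase v → True := fun _ => trivial
            by_cases hg : (last == a && v == b) = true
            · rw [if_pos hg] at hj0
              have hpj : pos = j0 := by injection hj0
              have hg' : last = a ∧ v = b := by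
                simpa [Bool.and_eq_true, beq_iff_eq] using hg
              have hla : last = a := hg'.1
              refine ⟨hpj ▸ h5, ?_⟩
              intro hmem
              rcases List.mem_cons.1 hmem with h | h
              · exact h3 (by rw [hla.trans h]; exact hv)
              · exact h3 (hla ▸ List.mem_of_mem_erase h)
            · rw [if_neg hg] at hj0
              rcases h4 j0 hj0 with ⟨hge, hnm⟩
              refine ⟨hge, ?_⟩
              intro hmem
              rcases List.mem_cons.1 hmem with h | h
              · exact hnm (List.mem_cons_of_mem _ (h ▸ hv))
              · exact hnm (List.mem_cons_of_mem _ (List.mem_of_mem_erase h))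
          have hrec := ih (rem.erase v) v (pos + 1)
            (if last == a && v == b then some pos else j) c'
            (h1.erase v)
            (by
              have := List.length_erase_of_mem hv
              omega)
            h1.not_mem_erase
            hj' (by omega)
          have hcont : rem.contains v = true := by simpa using hv
          beta_reduce
          rw [if_pos hcont, if_pos hv]
          exact hrec
        · have hcont : ¬ rem.contains v = true := by simpa using hv
          beta_reduce
          rw [if_neg hcont, if_neg hv]
          simp
      refine ⟨hfold.1, fun hi => ?_⟩
      rw [hfold.2 hi]
      rw [← pvSum_cons adj a b rem last pos j i h1 hrem h3 (fun j0 hj0 => (h4 j0 hj0).2) hadj]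

theorem pvInnerA_spec (cond : Int → Bool) (js : List Int) (hnd : js.Nodup)
    (hpos : ∀ x ∈ js, 0 ≤ x) (i : Nat) :
    ∀ c : List Int,
      ((js.foldl (fun c j => if cond j then
          PySem.List.pySetD c j (PySem.List.pyGetD c j 0 + 1) else c) c).length = c.length)
      ∧ (i < c.length →
        (js.foldl (fun c j => if cond j then
          PySem.List.pySetD c j (PySem.List.pyGetD c j 0 + 1) else c) c).getD i 0
          = c.getD i 0 + (if (i : Int) ∈ js ∧ cond (i : Int) then 1 else 0)) := by
  induction js with
  | nil => intro c; simp
  | cons x t ih =>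
    have hx0 : 0 ≤ x := hpos x (by simp)
    have iht := ih (List.nodup_cons.1 hnd).2 (fun y hy => hpos y (by simp [hy]))
    intro c
    rw [List.foldl_cons]
    by_cases hcx : cond x = true
    · rw [if_pos hcx]
      set c' := PySem.List.pySetD c x (PySem.List.pyGetD c x 0 + 1) with hc'
      have hlen : c'.length = c.length := PySem.List.length_pySetD _ _ _
      refine ⟨by rw [(iht c').1, hlen], fun hi => ?_⟩
      rw [(iht c').2 (by omega)]
      have hgd : c'.getD i 0 = if (i : Int) = x then PySem.List.pyGetD c x 0 + 1 else c.getD i 0 :=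
        pvSetD_getD c x _ hx0 i hi
      by_cases hix : (i : Int) = x
      · have hnt : (i : Int) ∉ t := by
          intro hmem
          exact (List.nodup_cons.1 hnd).1 (hix ▸ hmem)
        rw [hgd, if_pos hix]
        rw [show PySem.List.pyGetD c x 0 = c.getD i 0 from by
          rw [← hix, PySem.List.pyGetD_natCast]]
        rw [if_neg (by tauto), if_pos ⟨by simp [hix], by rw [hix]; exact hcx⟩]
        ring
      · rw [hgd, if_neg hix]
        congr 1
        by_cases hit : (i : Int) ∈ t ∧ cond (i : Int) = true
        · rw [if_pos hit, if_pos ⟨by simp [hit.1], hit.2⟩]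
        · rw [if_neg hit, if_neg (by
            intro hcon
            rcases hcon with ⟨hm, hc⟩
            rcases List.mem_cons.1 hm with h | h
            · exact hix h
            · exact hit ⟨h, hc⟩)]
    · rw [if_neg hcx]
      refine ⟨(iht c).1, fun hi => ?_⟩
      rw [(iht c).2 hi]
      congr 1
      by_cases hit : (i : Int) ∈ t ∧ cond (i : Int) = true
      · rw [if_pos hit, if_pos ⟨by simp [hit.1], hit.2⟩]
      · rw [if_neg hit, if_neg (by
          intro hcon
          rcases hcon with ⟨hm, hc⟩
          rcases List.mem_cons.1 hm with h | h
          · rw [h] at hc; exact hcx hc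
          · exact hit ⟨h, hc⟩)]


-- ---------- pointwise bridge between A's and B's per-permutation counts ----------
theorem pvPointwise (T : List (Int × Int × Int)) (n a b : Int) (i : Nat)
    (hi : i < (n - 1).toNat) (u : Int) (q : List Int)
    (hu : u ∈ PySem.List.pyRange 0 n 1)
    (hq : q.Perm ((PySem.List.pyRange 0 n 1).erase u)) :
    (if pvProd (pvTp T a b) (u :: q) (PySem.List.pyRange 0 (n - 1) 1) > 0 then
       (if ((i : Int) ∈ PySem.List.pyRange 0 (n - 1) 1 ∧
            (PySem.List.pyGetD (u :: q) (i : Int) 0 == a &&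
             PySem.List.pyGetD (u :: q) ((i : Int) + 1) 0 == b) = true) then (1 : Int) else 0)
     else 0)
    = pvContrib (pvAdj (pvTp T a b)) a b 0 none u q i := by
  have hkeys := pvTp_keys_nodup T a b
  have hn1 : (1 : Int) ≤ n := by
    rcases PySem.List.mem_pyRange_one.1 hu with ⟨h1, h2⟩
    omega
  have hperm : (u :: q).Perm (PySem.List.pyRange 0 n 1) := by
    have h1 : (PySem.List.pyRange 0 n 1).Perm (u :: (PySem.List.pyRange 0 n 1).erase u) :=
      List.perm_cons_erase hu
    exact (List.Perm.cons u hq).trans h1.symm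
  have hlen : (u :: q).length = (n - 1).toNat + 1 := by
    rw [hperm.length_eq, PySem.List.length_pyRange_one]
    omega
  have hnd : (u :: q).Nodup := (hperm.nodup_iff).2 (PySem.List.nodup_pyRange_one 0 n)
  have hrange : PySem.List.pyRange 0 (n - 1) 1
      = PySem.List.pyRange ((0 : Nat) : Int) (((u :: q).length : Int) - 1) 1 := by
    rw [hlen]
    norm_num
    congr 1
    omega
  have hprod := pvProd_eq (pvTp T a b) hkeys (u :: q) q 0 u (by rw [List.drop_zero])
  rw [← hrange] at hprod
  rw [hprod]
  have hmem : (i : Int) ∈ PySem.List.pyRange 0 (n - 1) 1 := by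
    rw [PySem.List.mem_pyRange_one]
    exact ⟨by omega, by omega⟩
  have hcondiff : ((PySem.List.pyGetD (u :: q) (i : Int) 0 == a &&
        PySem.List.pyGetD (u :: q) ((i : Int) + 1) 0 == b) = true)
      ↔ pvFirstAB a b (u :: q) = some i := by
    rw [Bool.and_eq_true, beq_iff_eq, beq_iff_eq]
    rw [PySem.List.pyGetD_natCast]
    rw [show ((i : Int) + 1) = ((i + 1 : Nat) : Int) from by push_cast; ring,
      PySem.List.pyGetD_natCast]
    exact (pvFirstAB_iff a b (u :: q) hnd i (by omega)).symm
  by_cases hch : pvChain (pvAdj (pvTp T a b)) u q = true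
  · rw [if_pos (show (if pvChain (pvAdj (pvTp T a b)) u q = true then (1 : Int) else 0) > 0 by
      rw [hch]; norm_num)]
    cases hf : pvFirstAB a b (u :: q) with
    | none =>
      rw [if_neg (fun hcon => by
        have h2 := hcondiff.1 hcon.2
        rw [hf] at h2
        simp at h2)]
      simp [pvContrib, hch, hf]
    | some k =>
      rw [hf] at hcondiff
      by_cases hki : k = i
      · subst hki
        rw [if_pos ⟨hmem, hcondiff.2 rfl⟩]
        simp [pvContrib, hch, hf]
      · rw [if_neg (fun hcon => hki (by injection (hcondiff.1 hcon.2)))]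
        have hne : ¬((0 : Int) + (k : Int) = (i : Int)) := by
          push_cast
          omega
        simp only [pvContrib, hch, if_true, hf]
        rw [if_neg hne]
  · have hchf : pvChain (pvAdj (pvTp T a b)) u q = false := by simpa using hch
    rw [if_neg (show ¬ (if pvChain (pvAdj (pvTp T a b)) u q = true then (1 : Int) else 0) > 0 by
      rw [hchf]; norm_num)]
    simp [pvContrib, hchf]

-- ===== VERDICT (by name: the statement is the Claim_ definition above) =====
theorem compute_consec_spec : Claim_equal_compute_consec := by
  unfold Claim_equal_compute_consec
  intro T n a b _
  unfold Spec_compute_consec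
  have hkeys := pvTp_keys_nodup T a b
  have hadjnd : ∀ u, ((pvAdj (pvTp T a b)).getD u []).Nodup :=
    fun u => pvAdj_nodup _ hkeys u
  have hA : compute_consec T n a b
      = (PySem.List.permutations (PySem.List.pyRange 0 n 1)
          (PySem.List.pyRange 0 n 1).length).foldl
          (fun consec perm =>
            if pvProd (pvTp T a b) perm (PySem.List.pyRange 0 (n - 1) 1) > 0 then
              (PySem.List.pyRange 0 (n - 1) 1).foldl
                (fun c j =>
                  if PySem.List.pyGetD perm j 0 == a && PySem.List.pyGetD perm (j + 1) 0 == b then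
                    PySem.List.pySetD c j (PySem.List.pyGetD c j 0 + 1)
                  else c) consec
            else consec) (List.replicate (n - 1).toNat 0) := rfl
  have hB : compute_consec_alt T n a b
      = (PySem.List.pyRange 0 n 1).foldl
          (fun c u => pvDfs (pvAdj (pvTp T a b)) a b
            ((PySem.List.pyRange 0 n 1).erase u).length u
            ((PySem.List.pyRange 0 n 1).erase u) 0 none c)
          (List.replicate (n - 1).toNat 0) := rfl
  have HA : ∀ i : Nat,
      (compute_consec T n a b).length = (List.replicate (n - 1).toNat (0 : Int)).length ∧
      (i < (List.replicate (n - 1).toNat (0 : Int)).length →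
        (compute_consec T n a b).getD i 0
          = (List.replicate (n - 1).toNat (0 : Int)).getD i 0
            + ((PySem.List.permutations (PySem.List.pyRange 0 n 1)
                (PySem.List.pyRange 0 n 1).length).map
                (fun p => if pvProd (pvTp T a b) p (PySem.List.pyRange 0 (n - 1) 1) > 0 then
                    (if ((i : Int) ∈ PySem.List.pyRange 0 (n - 1) 1 ∧
                         (PySem.List.pyGetD p (i : Int) 0 == a &&
                          PySem.List.pyGetD p ((i : Int) + 1) 0 == b) = true)
                     then (1 : Int) else 0)
                  else 0)).sum) := by
    intro i
    rw [hA]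
    refine pvFoldStep _ _ _ i ?_ (List.replicate (n - 1).toNat 0)
    intro c p _
    beta_reduce
    have hinner := pvInnerA_spec
      (fun j => PySem.List.pyGetD p j 0 == a && PySem.List.pyGetD p (j + 1) 0 == b)
      (PySem.List.pyRange 0 (n - 1) 1)
      (PySem.List.nodup_pyRange_one 0 (n - 1))
      (fun x hx => (PySem.List.mem_pyRange_one.1 hx).1) i c
    by_cases hprod : pvProd (pvTp T a b) p (PySem.List.pyRange 0 (n - 1) 1) > 0
    · rw [if_pos hprod, if_pos hprod]
      exact hinner
    · rw [if_neg hprod, if_neg hprod]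
      exact ⟨rfl, fun _ => by simp⟩
  have HB : ∀ i : Nat,
      (compute_consec_alt T n a b).length = (List.replicate (n - 1).toNat (0 : Int)).length ∧
      (i < (List.replicate (n - 1).toNat (0 : Int)).length →
        (compute_consec_alt T n a b).getD i 0
          = (List.replicate (n - 1).toNat (0 : Int)).getD i 0
            + ((PySem.List.pyRange 0 n 1).map
                (fun u => pvSum (pvAdj (pvTp T a b)) a b u
                  ((PySem.List.pyRange 0 n 1).erase u) 0 none i)).sum) := by
    intro i
    rw [hB]
    refine pvFoldStep _ _ _ i ?_ (List.replicate (n - 1).toNat 0)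
    intro c u hu
    beta_reduce
    exact pvDfs_spec (pvAdj (pvTp T a b)) a b i hadjnd
      ((PySem.List.pyRange 0 n 1).erase u).length
      ((PySem.List.pyRange 0 n 1).erase u) u 0 none c
      ((PySem.List.nodup_pyRange_one 0 n).erase u)
      le_rfl
      (PySem.List.nodup_pyRange_one 0 n).not_mem_erase
      (fun j0 hj0 => nomatch hj0)
      le_rfl
  refine List.ext_getElem (by rw [(HA 0).1, (HB 0).1]) ?_
  intro idx h1 h2
  have hidx : idx < (List.replicate (n - 1).toNat (0 : Int)).length := by
    rw [← (HA 0).1]; exact h1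
  have hm : idx < (n - 1).toNat := by simpa using hidx
  rw [← List.getD_eq_getElem _ 0 h1, ← List.getD_eq_getElem _ 0 h2]
  rw [(HA idx).2 hidx, (HB idx).2 hidx]
  congr 1
  -- the two total counts agree
  have hne : PySem.List.pyRange 0 n 1 ≠ [] := by
    intro hcon
    have := PySem.List.length_pyRange_one 0 n
    rw [hcon] at this
    simp at this
    omega
  rw [pvSum_perms_cons (PySem.List.pyRange 0 n 1) (PySem.List.nodup_pyRange_one 0 n) hne]
  apply congrArg
  apply List.map_congr_left
  intro u hu
  unfold pvSum
  apply congrArg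
  apply List.map_congr_left
  intro q hq
  exact pvPointwise T n a b idx hm u q hu (PySem.List.perm_of_mem_permutations hq)
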